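-- pv_equiv track=rewrite | github.com/smetanadvorak/programming_problems | yandex/interview/6_optimization/optimization.py | distribute_roles
-- ===== SOURCE A (Python) =====
-- def distribute_roles(a,b):
-- 	d = []
-- 	for i in range(len(a)):
-- 		d.append(a[i] - b[i])
-- 	inds = sorted(range(len(d)), key=d.__getitem__)
-- 	indsb = inds[:int(len(inds)/2)]
-- 	indsa = inds[int(len(inds)/2):]
-- 	value = sum(a[i] for i in indsa ) + sum(b[i] for i in indsb)
--
-- 	return value
-- ===== SOURCE B (Python) =====
-- def top_sum(xs, k):
--     # sum of the k largest elements of xs, by quickselect-style partitioning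
--     if k <= 0:
--         return 0
--     if k >= len(xs):
--         return sum(xs)
--     pivot = xs[len(xs) // 2]
--     hi = [x for x in xs if x > pivot]
--     if k <= len(hi):
--         return top_sum(hi, k)
--     eq = [x for x in xs if x == pivot]
--     if k <= len(hi) + len(eq):
--         return sum(hi) + pivot * (k - len(hi))
--     lo = [x for x in xs if x < pivot]
--     return sum(hi) + sum(eq) + top_sum(lo, k - len(hi) - len(eq))
--
-- def distribute_roles(a, b):
--     # value = sum(b[:n]) + sum of the top ceil(n/2) differences a[i]-b[i],
--     # where the top-k sum is found by partitioning, no sort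
--     n = len(a)
--     d = [a[i] - b[i] for i in range(n)]
--     return sum(b[:n]) + top_sum(d, n - n // 2)
-- ===== Notes on version B (the rewrite author's own statement) =====
-- stated objective: faster
-- what changed: A argsorts index positions by a[i]-b[i] and sums a over the upper index half and b over the lower; B never sorts: it computes sum(b[:n]) plus the sum of the top ceil(n/2) differences found by a quickselect-style three-way partition recursion.
import Mathlib
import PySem

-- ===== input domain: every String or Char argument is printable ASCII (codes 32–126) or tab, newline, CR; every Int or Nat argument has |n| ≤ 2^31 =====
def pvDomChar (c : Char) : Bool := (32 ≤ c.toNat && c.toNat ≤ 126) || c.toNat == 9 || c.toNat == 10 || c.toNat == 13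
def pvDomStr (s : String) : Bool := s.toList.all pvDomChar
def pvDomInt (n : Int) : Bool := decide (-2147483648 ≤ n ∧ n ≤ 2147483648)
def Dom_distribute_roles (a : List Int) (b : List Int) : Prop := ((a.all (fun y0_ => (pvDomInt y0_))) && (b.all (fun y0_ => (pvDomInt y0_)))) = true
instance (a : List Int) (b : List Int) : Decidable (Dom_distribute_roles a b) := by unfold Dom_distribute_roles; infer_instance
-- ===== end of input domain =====

-- B replaces A's sort of index positions by differences with a quickselect-style
-- partition recursion that sums the top ceil(n/2) differences directly, plus sum(b[:n]).

-- ===== PORT A =====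
-- literal transliteration of A; a[i]/b[i] are in range under Pre_ (a.length ≤ b.length);
-- int(len(inds)/2) is ported as floor division, exact for all list lengths
def distribute_roles (a : List Int) (b : List Int) : Int :=
  let d : List Int :=
    (PySem.List.pyRange 0 (a.length : Int) 1).foldl
      (fun acc i => acc ++ [PySem.List.pyGetD a i 0 - PySem.List.pyGetD b i 0]) []
  let inds := PySem.List.sorted (PySem.List.pyRange 0 (d.length : Int) 1)
      (fun i => PySem.List.pyGetD d i 0) false
  let h : Int := PySem.Int.floordiv (inds.length : Int) 2
  let indsb := PySem.List.slice inds none (some h)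
  let indsa := PySem.List.slice inds (some h) none
  (indsa.map (fun i => PySem.List.pyGetD a i 0)).sum
    + (indsb.map (fun i => PySem.List.pyGetD b i 0)).sum

-- ===== PORT B =====
-- literal transliteration of Source B's top_sum: quickselect-style partitioning on the
-- middle element; termination by the strict shrinking of the partitions
def topSum (xs : List Int) (k : Int) : Int :=
  if _h1 : k ≤ 0 then 0
  else if _h2 : (xs.length : Int) ≤ k then xs.sum
  else
    let pivot := PySem.List.pyGetD xs (PySem.Int.floordiv (xs.length : Int) 2) 0
    let hi := xs.filter (fun x => pivot < x)
    if _h3 : k ≤ (hi.length : Int) then topSum hi k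
    else
      let eq := xs.filter (fun x => x == pivot)
      if _h4 : k ≤ (hi.length : Int) + (eq.length : Int) then
        hi.sum + pivot * (k - (hi.length : Int))
      else
        let lo := xs.filter (fun x => x < pivot)
        hi.sum + eq.sum + topSum lo (k - (hi.length : Int) - (eq.length : Int))
termination_by xs.length
decreasing_by
  · -- hi shrinks: pivot itself is not kept by the filter
    have hmem : pivot ∈ xs := by
      apply PySem.List.pyGetD_mem
      have h : PySem.Int.floordiv ((xs.length : Nat) : Int) 2 = ((xs.length / 2 : Nat) : Int) := by
        exact_mod_cast PySem.Int.floordiv_natCast xs.length 2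
      rw [h]
      unfold PySem.Raise.InRange
      exact ⟨by omega, by omega⟩
    simp only [List.length_unattach]
    exact lt_of_lt_of_eq
      (List.length_filter_lt_length_iff_exists.mpr ⟨⟨pivot, hmem⟩, List.mem_attach xs _, by simp only [decide_eq_true_eq]; exact lt_irrefl _⟩)
      List.length_attach
  · -- lo shrinks likewise
    have hmem : pivot ∈ xs := by
      apply PySem.List.pyGetD_mem
      have h : PySem.Int.floordiv ((xs.length : Nat) : Int) 2 = ((xs.length / 2 : Nat) : Int) := by
        exact_mod_cast PySem.Int.floordiv_natCast xs.length 2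
      rw [h]
      unfold PySem.Raise.InRange
      exact ⟨by omega, by omega⟩
    simp only [List.length_unattach]
    exact lt_of_lt_of_eq
      (List.length_filter_lt_length_iff_exists.mpr ⟨⟨pivot, hmem⟩, List.mem_attach xs _, by simp only [decide_eq_true_eq]; exact lt_irrefl _⟩)
      List.length_attach

-- literal transliteration of Source B's distribute_roles; b[:n] is a slice, n - n//2 the top count
def distribute_roles_alt (a : List Int) (b : List Int) : Int :=
  let n := a.length
  let d := (PySem.List.pyRange 0 (n : Int) 1).map
      (fun i => PySem.List.pyGetD a i 0 - PySem.List.pyGetD b i 0)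
  (PySem.List.slice b none (some (n : Int))).sum
    + topSum d ((n : Int) - PySem.Int.floordiv (n : Int) 2)

-- ===== PRECONDITION & SPEC =====
-- Python A (and B) raises IndexError on b[i] when len(b) < len(a); exactly those inputs are excluded.
def Pre_distribute_roles (a : List Int) (b : List Int) : Prop := a.length ≤ b.length
instance (a : List Int) (b : List Int) : Decidable (Pre_distribute_roles a b) := by
  unfold Pre_distribute_roles; infer_instance

def pvWitness_distribute_roles : List Int × List Int := ([3, 1, 4], [2, 2, 0])

def Spec_distribute_roles (a : List Int) (b : List Int) (out : Int) : Prop := out = distribute_roles_alt a b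
instance (a : List Int) (b : List Int) (out : Int) : Decidable (Spec_distribute_roles a b out) := by unfold Spec_distribute_roles; infer_instance

-- ===== CLAIM (what is proved, stated in full; the proofs are below) =====
def Claim_equal_distribute_roles : Prop := ∀ (a : List Int) (b : List Int), Dom_distribute_roles a b → Pre_distribute_roles a b → Spec_distribute_roles a b (distribute_roles a b)

-- ===== LEMMAS AND PROOFS =====

-- the three-way partition of xs at pivot, each part sorted, IS sorted xs
theorem pv_sorted_partition (xs : List Int) (p : Int) :
    PySem.List.sorted xs (fun x => x) false
      = PySem.List.sorted (xs.filter (fun x => x < p)) (fun x => x) false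
        ++ xs.filter (fun x => x == p)
        ++ PySem.List.sorted (xs.filter (fun x => p < x)) (fun x => x) false := by
  apply PySem.List.sorted_id_eq_of_perm_of_pairwise
  · -- permutation, by counting each value
    rw [List.perm_iff_count]
    intro y
    have hlo := (PySem.List.sorted_perm (xs.filter (fun x => x < p)) (fun x => x) false).count_eq y
    have hhi := (PySem.List.sorted_perm (xs.filter (fun x => p < x)) (fun x => x) false).count_eq y
    rw [List.count_append, List.count_append, hlo, hhi]
    rcases lt_trichotomy y p with h | h | h
    · have c1 : List.count y (xs.filter (fun x => x < p)) = List.count y xs :=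
        List.count_filter (by simp [h])
      have c2 : List.count y (xs.filter (fun x => x == p)) = 0 :=
        List.count_eq_zero.mpr (fun hc => by
          have := (List.mem_filter.mp hc).2; simp at this; omega)
      have c3 : List.count y (xs.filter (fun x => p < x)) = 0 :=
        List.count_eq_zero.mpr (fun hc => by
          have := (List.mem_filter.mp hc).2; simp at this; omega)
      omega
    · subst h
      have c1 : List.count y (xs.filter (fun x => x < y)) = 0 :=
        List.count_eq_zero.mpr (fun hc => by
          have := (List.mem_filter.mp hc).2; simp at this)
      have c2 : List.count y (xs.filter (fun x => x == y)) = List.count y xs :=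
        List.count_filter (by simp)
      have c3 : List.count y (xs.filter (fun x => y < x)) = 0 :=
        List.count_eq_zero.mpr (fun hc => by
          have := (List.mem_filter.mp hc).2; simp at this)
      omega
    · have c1 : List.count y (xs.filter (fun x => x < p)) = 0 :=
        List.count_eq_zero.mpr (fun hc => by
          have := (List.mem_filter.mp hc).2; simp at this; omega)
      have c2 : List.count y (xs.filter (fun x => x == p)) = 0 :=
        List.count_eq_zero.mpr (fun hc => by
          have := (List.mem_filter.mp hc).2; simp at this; omega)
      have c3 : List.count y (xs.filter (fun x => p < x)) = List.count y xs :=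
        List.count_filter (by simp [h])
      omega
  · -- pairwise ≤ across the three sorted/constant blocks
    have hlo : ∀ y ∈ PySem.List.sorted (xs.filter (fun x => x < p)) (fun x => x) false, y < p := by
      intro y hy
      have := (PySem.List.mem_sorted _ _ _ _).mp hy
      simpa using (List.mem_filter.mp this).2
    have heq : ∀ y ∈ xs.filter (fun x => x == p), y = p := by
      intro y hy
      simpa using (List.mem_filter.mp hy).2
    have hhi : ∀ y ∈ PySem.List.sorted (xs.filter (fun x => p < x)) (fun x => x) false, p < y := by
      intro y hy
      have := (PySem.List.mem_sorted _ _ _ _).mp hy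
      simpa using (List.mem_filter.mp this).2
    rw [List.pairwise_append, List.pairwise_append]
    refine ⟨⟨PySem.List.sorted_pairwise _ _, ?_, ?_⟩, PySem.List.sorted_pairwise _ _, ?_⟩
    · exact List.pairwise_of_forall_mem_list
        (fun a ha b hb => by rw [heq a ha, heq b hb])
    · intro a ha b hb
      rw [heq b hb]; exact le_of_lt (hlo a ha)
    · intro a ha c hc
      rcases List.mem_append.mp ha with h | h
      · exact le_of_lt (lt_trans (hlo a h) (hhi c hc))
      · rw [heq a h]; exact le_of_lt (hhi c hc)

-- topSum xs k is the sum of the k largest elements, i.e. the tail of sorted xs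
theorem pv_topSum_eq (N : Nat) : ∀ (xs : List Int), xs.length ≤ N → ∀ (k : Nat), k ≤ xs.length →
    topSum xs (k : Int) = ((PySem.List.sorted xs (fun x => x) false).drop (xs.length - k)).sum := by
  induction N with
  | zero =>
    intro xs hN k hk
    have hk0 : k = 0 := by omega
    have hxs : xs = [] := List.eq_nil_of_length_eq_zero (by omega)
    subst hk0; subst hxs
    rw [topSum]
    simp [(PySem.List.sorted_perm ([] : List Int) (fun x => x) false).sum_eq]
  | succ N ih =>
    intro xs hN k hk
    rw [topSum]
    have hslen : (PySem.List.sorted xs (fun x => x) false).length = xs.length :=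
      (PySem.List.sorted_perm xs (fun x => x) false).length_eq
    by_cases h1 : (k : Int) ≤ 0
    · rw [dif_pos h1]
      rw [List.drop_eq_nil_of_le (by omega)]
      simp
    rw [dif_neg h1]
    by_cases h2 : (xs.length : Int) ≤ (k : Int)
    · rw [dif_pos h2]
      have : k = xs.length := by omega
      subst this
      simp [(PySem.List.sorted_perm xs (fun x => x) false).sum_eq]
    rw [dif_neg h2]
    -- now 0 < k < xs.length
    have hkpos : 0 < k := by omega
    have hklt : k < xs.length := by exact_mod_cast not_le.mp h2
    set p := PySem.List.pyGetD xs (PySem.Int.floordiv (xs.length : Int) 2) 0 with hp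
    set lo := xs.filter (fun x => x < p) with hloDef
    set eq := xs.filter (fun x => x == p) with heqDef
    set hi := xs.filter (fun x => p < x) with hhiDef
    have hpart := pv_sorted_partition xs p
    rw [← hloDef, ← heqDef, ← hhiDef] at hpart
    set slo := PySem.List.sorted lo (fun x => x) false with hsloDef
    set shi := PySem.List.sorted hi (fun x => x) false with hshiDef
    have hlenslo : slo.length = lo.length := (PySem.List.sorted_perm lo _ false).length_eq
    have hlenshi : shi.length = hi.length := (PySem.List.sorted_perm hi _ false).length_eq
    have hlensum : lo.length + eq.length + hi.length = xs.length := by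
      have := congrArg List.length hpart
      rw [hslen] at this
      simp [hlenslo, hlenshi] at this
      omega
    have hsum_shi : shi.sum = hi.sum := (PySem.List.sorted_perm hi _ false).sum_eq
    have heqall : ∀ y ∈ eq, y = p := by
      intro y hy; simpa using (List.mem_filter.mp hy).2
    have hmem : p ∈ xs := by
      apply PySem.List.pyGetD_mem
      have h : PySem.Int.floordiv ((xs.length : Nat) : Int) 2 = ((xs.length / 2 : Nat) : Int) := by
        exact_mod_cast PySem.Int.floordiv_natCast xs.length 2
      rw [h]
      unfold PySem.Raise.InRange
      exact ⟨by omega, by omega⟩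
    have hhi_lt : hi.length < xs.length :=
      List.length_filter_lt_length_iff_exists.mpr ⟨p, hmem, by simp⟩
    have heq_pos : 0 < eq.length :=
      List.length_pos_of_mem (List.mem_filter.mpr ⟨hmem, by simp⟩)
    have hlo_le : lo.length ≤ xs.length := List.length_filter_le _ _
    rw [hpart, List.append_assoc, List.drop_append, List.drop_append,
      List.sum_append, List.sum_append]
    by_cases h3 : (k : Int) ≤ (hi.length : Int)
    · rw [dif_pos h3]
      have hkhi : k ≤ hi.length := by exact_mod_cast h3
      rw [List.drop_eq_nil_of_le (by omega)]
      rw [List.drop_eq_nil_of_le (by omega)]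
      rw [show xs.length - k - slo.length - eq.length = hi.length - k by omega]
      rw [ih hi (by omega) k (by omega)]
      simp
      rw [← hshiDef]
    rw [dif_neg h3]
    have hk3 : hi.length < k := by exact_mod_cast not_le.mp h3
    by_cases h4 : (k : Int) ≤ (hi.length : Int) + (eq.length : Int)
    · rw [dif_pos h4]
      have hk4 : k ≤ hi.length + eq.length := by exact_mod_cast h4
      rw [List.drop_eq_nil_of_le (by omega)]
      rw [show xs.length - k - slo.length - eq.length = 0 by omega, List.drop_zero]
      have hdropmem : ∀ y ∈ eq.drop (xs.length - k - slo.length), y = p :=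
        fun y hy => heqall y (List.mem_of_mem_drop hy)
      have hdsum := List.sum_eq_card_nsmul _ p hdropmem
      rw [List.length_drop] at hdsum
      rw [hdsum, show eq.length - (xs.length - k - slo.length) = k - hi.length by omega,
        hsum_shi]
      have hc : ((k - hi.length : Nat) : Int) = (k : Int) - (hi.length : Int) := by omega
      simp [hc]
      ring
    rw [dif_neg h4]
    dsimp only
    rw [← hloDef, ← heqDef, ← hhiDef]
    have hk4 : hi.length + eq.length < k := by exact_mod_cast not_le.mp h4
    set k' := k - hi.length - eq.length with hk'Def
    rw [show (k : Int) - (hi.length : Int) - (eq.length : Int) = ((k' : Nat) : Int) by omega]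
    rw [ih lo (by omega) k' (by omega), ← hsloDef]
    rw [show xs.length - k - slo.length = 0 by omega]
    simp only [List.drop_zero, Nat.zero_sub]
    rw [show xs.length - k = lo.length - k' by omega, hsum_shi]
    ring

-- range(n) mapped through b-lookup is b[:n] when n ≤ len(b)
theorem pv_map_pyGetD_range_take (b : List Int) (n : Nat) (h : n ≤ b.length) :
    (PySem.List.pyRange 0 (n : Int) 1).map (fun i => PySem.List.pyGetD b i 0) = b.take n := by
  apply List.ext_getElem
  · simp [PySem.List.length_pyRange_one, h]
  · intro k h1 h2
    have hk : k < n := by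
      simpa [PySem.List.length_pyRange_one] using h1
    rw [List.getElem_map, PySem.List.getElem_pyRange_one]
    rw [PySem.List.pyGetD_eq_getElem b 0 (by omega) (by omega)]
    simp [List.getElem_take]

-- A's value, rephrased: sum(b[:n]) + sum of the top ceil(n/2) sorted differences
theorem pv_A_eq (a b : List Int) (hpre : a.length ≤ b.length) :
    distribute_roles a b
      = (b.take a.length).sum
        + ((PySem.List.sorted
              ((PySem.List.pyRange 0 (a.length : Int) 1).map
                (fun i => PySem.List.pyGetD a i 0 - PySem.List.pyGetD b i 0))
              (fun x => x) false).drop (a.length / 2)).sum := by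
  unfold distribute_roles
  dsimp only
  set n := a.length with hn
  set f : Int → Int := fun i => PySem.List.pyGetD a i 0 - PySem.List.pyGetD b i 0 with hf
  rw [PySem.List.foldl_append_singleton_eq_map f (PySem.List.pyRange 0 (n : Int) 1) []]
  rw [List.nil_append]
  set d : List Int := (PySem.List.pyRange 0 (n : Int) 1).map f with hd
  have hdlen : d.length = n := by
    simp [hd, PySem.List.length_pyRange_one]
  rw [hdlen]
  set key : Int → Int := fun i => PySem.List.pyGetD d i 0 with hkey
  set inds := PySem.List.sorted (PySem.List.pyRange 0 (n : Int) 1) key false with hinds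
  have hkeyf : ∀ i ∈ PySem.List.pyRange 0 (n : Int) 1, key i = f i := by
    intro i hi
    obtain ⟨h0, h1⟩ := PySem.List.mem_pyRange_one.mp hi
    simp only [hkey, hd]
    exact PySem.List.pyGetD_map_pyRange_of_nonneg f n i 0 h0 h1
  have hperm : inds.Perm (PySem.List.pyRange 0 (n : Int) 1) :=
    PySem.List.sorted_perm _ _ _
  have hlen : inds.length = n := by
    simp [hinds, PySem.List.length_sorted, PySem.List.length_pyRange_one]
  have hhalf : PySem.Int.floordiv (inds.length : Int) 2 = ((n / 2 : Nat) : Int) := by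
    rw [hlen]; exact_mod_cast PySem.Int.floordiv_natCast n 2
  rw [hhalf, PySem.List.slice_to_natCast, PySem.List.slice_from_natCast]
  have habk : ∀ i ∈ inds,
      PySem.List.pyGetD a i 0 = PySem.List.pyGetD b i 0 + key i := by
    intro i hi
    have := hkeyf i (hperm.mem_iff.mp hi)
    rw [this]; simp [hf]
  have hdropsum :
      ((inds.drop (n / 2)).map (fun i => PySem.List.pyGetD a i 0)).sum
        = ((inds.drop (n / 2)).map (fun i => PySem.List.pyGetD b i 0)).sum
          + ((inds.map key).drop (n / 2)).sum := by
    rw [← List.map_drop]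
    rw [List.map_congr_left (fun i hi => habk i (List.mem_of_mem_drop hi))]
    exact PySem.List.sum_map_add_int _ _ _
  rw [hdropsum]
  have hsorted : PySem.List.sorted d (fun x => x) false = inds.map key := by
    apply PySem.List.sorted_id_eq_of_perm_of_pairwise
    · calc (inds.map key).Perm ((PySem.List.pyRange 0 (n : Int) 1).map key) :=
            hperm.map key
        _ = d := by
            rw [hd]; exact List.map_congr_left hkeyf
    · exact (PySem.List.sorted_pairwise _ _).map _ (fun p q h => h)
  have hbsum :
      ((inds.drop (n / 2)).map (fun i => PySem.List.pyGetD b i 0)).sum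
        + ((inds.take (n / 2)).map (fun i => PySem.List.pyGetD b i 0)).sum
        = (b.take n).sum := by
    have hsplit : (inds.take (n / 2)).map (fun i => PySem.List.pyGetD b i 0)
        ++ (inds.drop (n / 2)).map (fun i => PySem.List.pyGetD b i 0)
        = inds.map (fun i => PySem.List.pyGetD b i 0) := by
      rw [← List.map_append, List.take_append_drop]
    have hpermsum : (inds.map (fun i => PySem.List.pyGetD b i 0)).sum
        = ((PySem.List.pyRange 0 (n : Int) 1).map (fun i => PySem.List.pyGetD b i 0)).sum :=
      (hperm.map _).sum_eq
    calc ((inds.drop (n / 2)).map (fun i => PySem.List.pyGetD b i 0)).sum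
          + ((inds.take (n / 2)).map (fun i => PySem.List.pyGetD b i 0)).sum
        = ((inds.take (n / 2)).map (fun i => PySem.List.pyGetD b i 0)
            ++ (inds.drop (n / 2)).map (fun i => PySem.List.pyGetD b i 0)).sum := by
          rw [List.sum_append]; ring
      _ = (b.take n).sum := by
          rw [hsplit, hpermsum, pv_map_pyGetD_range_take b n hpre]
  rw [← hsorted] at hdropsum ⊢
  omega

-- ===== VERDICT =====
theorem distribute_roles_spec : Claim_equal_distribute_roles := by
  intro a b _hdom hpre
  unfold Spec_distribute_roles distribute_roles_alt
  unfold Pre_distribute_roles at hpre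
  dsimp only
  set n := a.length with hn
  set d := (PySem.List.pyRange 0 (n : Int) 1).map
      (fun i => PySem.List.pyGetD a i 0 - PySem.List.pyGetD b i 0) with hd
  have hdlen : d.length = n := by simp [hd, PySem.List.length_pyRange_one]
  have hhalf : PySem.Int.floordiv (n : Int) 2 = ((n / 2 : Nat) : Int) := by
    exact_mod_cast PySem.Int.floordiv_natCast n 2
  have hkcast : (n : Int) - PySem.Int.floordiv (n : Int) 2 = ((n - n / 2 : Nat) : Int) := by
    rw [hhalf]; omega
  rw [hkcast, pv_topSum_eq d.length d (le_refl _) (n - n / 2) (by omega)]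
  rw [PySem.List.slice_to_natCast]
  have e : d.length - (n - n / 2) = n / 2 := by omega
  rw [e]
  exact pv_A_eq a b hpre
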